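-- pv_equiv track=rewrite | github.com/HaotianFrankZhang/Allocate-Protein-Hinges | GNMhinges.py | filterTwoEnds
-- ===== SOURCE A (Python) =====
-- def filterTwoEnds(hinges, chainLength = [[0, 551], [552, 956]], trimmingLength = 15):
--     FilteringIndex = []
--     for item in chainLength:
--         # print (item)
--         FilteringIndex += list(range(item[0], item[0] + trimmingLength))
--         FilteringIndex += list(range(item[1] - trimmingLength + 1, item[1] + 1))
--     updateHinges = []
--     for item in hinges:
--         if item not in FilteringIndex:
--             updateHinges.append(item)
--
--     return updateHinges
-- ===== SOURCE B (Python) =====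
-- def filterTwoEnds(hinges, chainLength=[[0, 551], [552, 956]], trimmingLength=15):
--     def trimmed(x):
--         return any(c[0] <= x < c[0] + trimmingLength
--                    or c[1] - trimmingLength + 1 <= x <= c[1]
--                    for c in chainLength)
--     return [x for x in hinges if not trimmed(x)]
-- ===== Notes on version B (the rewrite author's own statement) =====
-- stated objective: faster
-- what changed: B drops the materialised FilteringIndex list entirely and tests each hinge with arithmetic bounds (lo <= x < lo+t or hi-t+1 <= x <= hi) against each chain on the fly.
import Mathlib
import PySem

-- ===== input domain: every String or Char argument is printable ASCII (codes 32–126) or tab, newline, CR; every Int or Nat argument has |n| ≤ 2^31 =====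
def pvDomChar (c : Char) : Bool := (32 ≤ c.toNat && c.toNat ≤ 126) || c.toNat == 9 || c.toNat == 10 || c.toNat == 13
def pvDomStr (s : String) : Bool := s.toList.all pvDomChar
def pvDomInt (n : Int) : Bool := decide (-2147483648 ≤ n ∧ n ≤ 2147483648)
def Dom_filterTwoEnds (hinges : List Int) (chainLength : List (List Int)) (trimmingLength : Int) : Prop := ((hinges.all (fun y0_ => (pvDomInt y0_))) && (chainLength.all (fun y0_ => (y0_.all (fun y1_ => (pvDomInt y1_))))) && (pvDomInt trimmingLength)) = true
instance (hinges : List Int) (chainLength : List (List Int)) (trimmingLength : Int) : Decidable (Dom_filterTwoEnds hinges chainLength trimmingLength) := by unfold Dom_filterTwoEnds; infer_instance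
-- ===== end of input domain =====

-- B replaces A's materialised forbidden-index list by an on-the-fly arithmetic window test per hinge (faster: no O(c*t) list to build and scan).

-- ===== PORT A =====
-- A: materialise every forbidden index into FilteringIndex, then keep hinges not in it.
def filterTwoEnds (hinges : List Int) (chainLength : List (List Int)) (trimmingLength : Int) : List Int :=
  let fi : List Int := chainLength.foldl (fun acc item =>
    (acc ++ PySem.List.pyRange (PySem.List.pyGetD item 0 0) (PySem.List.pyGetD item 0 0 + trimmingLength) 1)
      ++ PySem.List.pyRange (PySem.List.pyGetD item 1 0 - trimmingLength + 1) (PySem.List.pyGetD item 1 0 + 1) 1) []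
  hinges.foldl (fun acc x => if x ∈ fi then acc else acc ++ [x]) []

-- ===== PORT B =====
-- B: one pass over hinges, testing each against the arithmetic end-window bounds of every chain (no index list).
def pvTrimmed (chainLength : List (List Int)) (t x : Int) : Bool :=
  chainLength.any (fun c =>
    (decide (PySem.List.pyGetD c 0 0 ≤ x) && decide (x < PySem.List.pyGetD c 0 0 + t)) ||
    (decide (PySem.List.pyGetD c 1 0 - t + 1 ≤ x) && decide (x ≤ PySem.List.pyGetD c 1 0)))

def filterTwoEnds_alt (hinges : List Int) (chainLength : List (List Int)) (trimmingLength : Int) : List Int :=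
  hinges.filter (fun x => ! pvTrimmed chainLength trimmingLength x)

-- ===== PRECONDITION & SPEC =====
-- Pre_ excludes chains with fewer than 2 entries, on which Python A raises IndexError (item[0]/item[1]).
def Pre_filterTwoEnds (hinges : List Int) (chainLength : List (List Int)) (trimmingLength : Int) : Prop :=
  ∀ c ∈ chainLength, 2 ≤ c.length
instance (hinges : List Int) (chainLength : List (List Int)) (trimmingLength : Int) : Decidable (Pre_filterTwoEnds hinges chainLength trimmingLength) := by unfold Pre_filterTwoEnds; infer_instance

def pvWitness_filterTwoEnds : List Int × List (List Int) × Int := ([1, 5, 9], [[0, 10]], 2)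

def Spec_filterTwoEnds (hinges : List Int) (chainLength : List (List Int)) (trimmingLength : Int) (out : List Int) : Prop := out = filterTwoEnds_alt hinges chainLength trimmingLength
instance (hinges : List Int) (chainLength : List (List Int)) (trimmingLength : Int) (out : List Int) : Decidable (Spec_filterTwoEnds hinges chainLength trimmingLength out) := by unfold Spec_filterTwoEnds; infer_instance

-- ===== CLAIM (what is proved, stated in full; the proofs are below) =====
def Claim_equal_filterTwoEnds : Prop := ∀ (hinges : List Int) (chainLength : List (List Int)) (trimmingLength : Int), Dom_filterTwoEnds hinges chainLength trimmingLength → Pre_filterTwoEnds hinges chainLength trimmingLength → Spec_filterTwoEnds hinges chainLength trimmingLength (filterTwoEnds hinges chainLength trimmingLength)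

-- ===== LEMMAS AND PROOFS =====

-- membership in A's FilteringIndex coincides with B's arithmetic window test
theorem mem_fi_iff (chainLength : List (List Int)) (t x : Int) :
    (x ∈ chainLength.foldl (fun acc item =>
      (acc ++ PySem.List.pyRange (PySem.List.pyGetD item 0 0) (PySem.List.pyGetD item 0 0 + t) 1)
        ++ PySem.List.pyRange (PySem.List.pyGetD item 1 0 - t + 1) (PySem.List.pyGetD item 1 0 + 1) 1) [])
    ↔ pvTrimmed chainLength t x = true := by
  have h : ∀ (acc : List Int), chainLength.foldl (fun acc item =>
      (acc ++ PySem.List.pyRange (PySem.List.pyGetD item 0 0) (PySem.List.pyGetD item 0 0 + t) 1)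
        ++ PySem.List.pyRange (PySem.List.pyGetD item 1 0 - t + 1) (PySem.List.pyGetD item 1 0 + 1) 1) acc
      = acc ++ chainLength.flatMap (fun item =>
          PySem.List.pyRange (PySem.List.pyGetD item 0 0) (PySem.List.pyGetD item 0 0 + t) 1
            ++ PySem.List.pyRange (PySem.List.pyGetD item 1 0 - t + 1) (PySem.List.pyGetD item 1 0 + 1) 1) := by
    intro acc
    induction chainLength generalizing acc with
    | nil => simp
    | cons c cs ih => rw [List.foldl_cons, ih, List.flatMap_cons]; simp [List.append_assoc]
  rw [h []]
  simp only [List.nil_append, List.mem_flatMap, List.mem_append, PySem.List.mem_pyRange_one,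
    pvTrimmed, List.any_eq_true]
  constructor
  · rintro ⟨c, hc, hx⟩
    refine ⟨c, hc, ?_⟩
    simp only [Bool.or_eq_true, Bool.and_eq_true, decide_eq_true_eq]
    omega
  · rintro ⟨c, hc, hx⟩
    refine ⟨c, hc, ?_⟩
    simp only [Bool.or_eq_true, Bool.and_eq_true, decide_eq_true_eq] at hx
    omega

-- A's accumulator loop over hinges is a filter
theorem foldl_if_mem_eq_filter (hinges fi acc : List Int) :
    hinges.foldl (fun acc x => if x ∈ fi then acc else acc ++ [x]) acc
    = acc ++ hinges.filter (fun x => decide (x ∉ fi)) := by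
  induction hinges generalizing acc with
  | nil => simp
  | cons y ys ih =>
    by_cases hy : y ∈ fi <;> simp [hy, ih]

-- ===== VERDICT (by name: the statement is the Claim_ definition above) =====
theorem filterTwoEnds_spec : Claim_equal_filterTwoEnds := by
  intro hinges chainLength trimmingLength _ _
  unfold Spec_filterTwoEnds filterTwoEnds filterTwoEnds_alt
  rw [foldl_if_mem_eq_filter]
  simp only [List.nil_append]
  apply List.filter_congr
  intro x _
  have hiff := mem_fi_iff chainLength trimmingLength x
  cases hpt : pvTrimmed chainLength trimmingLength x <;> simp_all
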